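-- pv_equiv track=rewrite | github.com/Hackathonv2/La-Quete-de-la-FiabiliteT1 | ex1/ex1.py | trouver_systeme_le_plus_fiable
-- ===== SOURCE A (Python) =====
-- def calculer_temps_indisponibilite(f, p, r):
--     return f * (p + r)
--
-- def trouver_systeme_le_plus_fiable(systemes):
--     temps_min = float('inf')
--     nom_systeme_fiable = ""
--
--     for nom, f, p, r in systemes:
--         temps = calculer_temps_indisponibilite(f, p, r)
--         if temps < temps_min:
--             temps_min = temps
--             nom_systeme_fiable = nom
--
--     return nom_systeme_fiable
-- ===== SOURCE B (Python) =====
-- def calculer_temps_indisponibilite(f, p, r):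
--     return f * (p + r)
--
-- def trouver_systeme_le_plus_fiable(systemes):
--     if not systemes:
--         return ""
--     ordre = sorted(systemes, key=lambda s: calculer_temps_indisponibilite(s[1], s[2], s[3]))
--     return ordre[0][0]
-- ===== Notes on version B (the rewrite author's own statement) =====
-- stated objective: alternative
-- what changed: Replaces the strict-< running-minimum scan with sort-by-downtime-key-then-take-first (stable sort preserves the first-among-ties behaviour); empty input returns "" as in A.
import Mathlib
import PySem

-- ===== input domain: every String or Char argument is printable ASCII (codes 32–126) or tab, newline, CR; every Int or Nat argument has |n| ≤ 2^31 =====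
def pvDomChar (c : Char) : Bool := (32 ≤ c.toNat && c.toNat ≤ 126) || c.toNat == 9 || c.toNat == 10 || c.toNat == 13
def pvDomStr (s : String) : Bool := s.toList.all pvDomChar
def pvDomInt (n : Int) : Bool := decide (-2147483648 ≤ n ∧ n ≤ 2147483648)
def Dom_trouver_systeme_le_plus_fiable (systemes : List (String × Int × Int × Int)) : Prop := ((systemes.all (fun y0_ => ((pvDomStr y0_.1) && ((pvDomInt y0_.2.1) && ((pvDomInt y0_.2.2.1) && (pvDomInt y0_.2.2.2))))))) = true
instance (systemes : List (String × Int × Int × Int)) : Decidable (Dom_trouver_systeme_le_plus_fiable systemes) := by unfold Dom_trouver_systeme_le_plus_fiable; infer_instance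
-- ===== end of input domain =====

-- ===== PORT A =====
-- B (below) replaces A's running-minimum scan with a stable sort by the downtime key; same return value, similar cost.
def calculer_temps_indisponibilite (f p r : Int) : Int := f * (p + r)

-- A's loop: temps_min starts at float('inf'); `none` models the initial infinity (every Int is below it).
def pvLoopA : List (String × Int × Int × Int) → Option Int → String → String
  | [], _, nom_systeme_fiable => nom_systeme_fiable
  | (nom, f, p, r) :: rest, temps_min, nom_systeme_fiable =>
    let temps := calculer_temps_indisponibilite f p r
    match temps_min with
    | none => pvLoopA rest (some temps) nom
    | some m => if temps < m then pvLoopA rest (some temps) nom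
                else pvLoopA rest (some m) nom_systeme_fiable

def trouver_systeme_le_plus_fiable (systemes : List (String × Int × Int × Int)) : String :=
  pvLoopA systemes none ""

-- ===== PORT B =====
def pvKeyB (s : String × Int × Int × Int) : Int := calculer_temps_indisponibilite s.2.1 s.2.2.1 s.2.2.2

def trouver_systeme_le_plus_fiable_alt (systemes : List (String × Int × Int × Int)) : String :=
  match PySem.List.sorted systemes pvKeyB false with
  | [] => ""
  | x :: _ => x.1

-- ===== PRECONDITION & SPEC =====
def Spec_trouver_systeme_le_plus_fiable (systemes : List (String × Int × Int × Int)) (out : String) : Prop := out = trouver_systeme_le_plus_fiable_alt systemes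
instance (systemes : List (String × Int × Int × Int)) (out : String) : Decidable (Spec_trouver_systeme_le_plus_fiable systemes out) := by unfold Spec_trouver_systeme_le_plus_fiable; infer_instance

-- ===== CLAIM =====
def Claim_equal_trouver_systeme_le_plus_fiable : Prop := ∀ (systemes : List (String × Int × Int × Int)), Dom_trouver_systeme_le_plus_fiable systemes → Spec_trouver_systeme_le_plus_fiable systemes (trouver_systeme_le_plus_fiable systemes)

-- ===== LEMMAS AND PROOFS =====
-- "first minimum": the element both programs select from a nonempty list (strict < keeps the earlier on ties)
def pvFirstMin (a : String × Int × Int × Int) : List (String × Int × Int × Int) → (String × Int × Int × Int)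
  | [] => a
  | y :: ys => if pvKeyB y < pvKeyB a then pvFirstMin y ys else pvFirstMin a ys

lemma pvLoopA_some (xs : List (String × Int × Int × Int)) :
    ∀ (a : String × Int × Int × Int), pvLoopA xs (some (pvKeyB a)) a.1 = (pvFirstMin a xs).1 := by
  induction xs with
  | nil => intro a; rfl
  | cons y ys ih =>
    intro a
    obtain ⟨n, f, p, r⟩ := y
    show (if pvKeyB (n, f, p, r) < pvKeyB a
            then pvLoopA ys (some (pvKeyB (n, f, p, r))) n
            else pvLoopA ys (some (pvKeyB a)) a.1)
        = (if pvKeyB (n, f, p, r) < pvKeyB a then pvFirstMin (n, f, p, r) ys else pvFirstMin a ys).1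
    split_ifs with h
    · exact ih (n, f, p, r)
    · exact ih a

lemma pvLoopA_eq_firstMin (x : String × Int × Int × Int) (xs : List (String × Int × Int × Int)) :
    pvLoopA (x :: xs) none "" = (pvFirstMin x xs).1 := by
  obtain ⟨n, f, p, r⟩ := x
  simpa [pvLoopA, pvKeyB, calculer_temps_indisponibilite]
    using pvLoopA_some xs (n, f, p, r)

lemma pvInsertBy_head (x : String × Int × Int × Int) (h : String × Int × Int × Int)
    (t : List (String × Int × Int × Int)) :
    PySem.List.insertBy (fun a b => decide (pvKeyB a < pvKeyB b)) x (h :: t)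
      = if pvKeyB x < pvKeyB h
          then x :: h :: t
          else h :: PySem.List.insertBy (fun a b => decide (pvKeyB a < pvKeyB b)) x t := by
  simp [PySem.List.insertBy]

lemma pvFoldl_insertBy_head (rest : List (String × Int × Int × Int)) :
    ∀ (h : String × Int × Int × Int) (t : List (String × Int × Int × Int)),
      ∃ t', rest.foldl (fun acc x => PySem.List.insertBy (fun a b => decide (pvKeyB a < pvKeyB b)) x acc) (h :: t)
              = pvFirstMin h rest :: t' := by
  induction rest with
  | nil => intro h t; exact ⟨t, rfl⟩
  | cons y ys ih =>
    intro h t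
    by_cases hc : pvKeyB y < pvKeyB h
    · simpa [List.foldl, pvInsertBy_head, pvFirstMin, hc] using ih y (h :: t)
    · simpa [List.foldl, pvInsertBy_head, pvFirstMin, hc]
        using ih h (PySem.List.insertBy (fun a b => decide (pvKeyB a < pvKeyB b)) y t)

lemma pvSorted_head (x : String × Int × Int × Int) (xs : List (String × Int × Int × Int)) :
    ∃ t', PySem.List.sorted (x :: xs) pvKeyB false = pvFirstMin x xs :: t' := by
  rw [PySem.List.sorted_eq_foldl_insertBy]
  simpa [List.foldl, PySem.List.insertBy] using pvFoldl_insertBy_head xs x []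

-- ===== VERDICT =====
theorem trouver_systeme_le_plus_fiable_spec : Claim_equal_trouver_systeme_le_plus_fiable := by
  intro systemes _
  unfold Spec_trouver_systeme_le_plus_fiable trouver_systeme_le_plus_fiable trouver_systeme_le_plus_fiable_alt
  cases systemes with
  | nil => rfl
  | cons x xs =>
    obtain ⟨t', ht⟩ := pvSorted_head x xs
    rw [ht, pvLoopA_eq_firstMin]
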